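-- pv_equiv track=rewrite | github.com/daniel5426/opticai | backend/migration/migrate_csv_to_postgres.py | extract_account_code_from_id
-- ===== SOURCE A (Python) =====
-- from typing import Dict, Optional, Any, List, Tuple, Iterator, Generator, Set
--
-- def extract_account_code_from_id(client_id: int, clinic_id: Optional[int] = None) -> str:
--     client_id_str = str(client_id)
--     if clinic_id is None:
--         for possible_clinic_id in range(1, 1000):
--             clinic_id_str = str(possible_clinic_id)
--             if client_id_str.startswith(clinic_id_str):
--                 return client_id_str[len(clinic_id_str):]
--         return client_id_str
--     clinic_id_str = str(clinic_id)
--     if client_id_str.startswith(clinic_id_str):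
--         return client_id_str[len(clinic_id_str):]
--     return client_id_str
-- ===== SOURCE B (Python) =====
-- def extract_account_code_from_id(client_id: int, clinic_id=None) -> str:
--     s = str(client_id)
--     if clinic_id is None:
--         # the 1..999 scan always strips exactly one leading nonzero digit
--         return s[1:] if s[:1] in "123456789" else s
--     p = str(clinic_id)
--     return s[len(p):] if s.startswith(p) else s
-- ===== Notes on version B (the rewrite author's own statement) =====
-- stated objective: simpler
-- what changed: The clinic_id=None branch's 999-iteration scan for a numeric prefix is replaced by a closed-form test: since range(1,1000) checks single digits 1-9 first and every candidate starts with a nonzero digit, the loop strips exactly one leading character iff it is in '123456789'.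
import Mathlib
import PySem

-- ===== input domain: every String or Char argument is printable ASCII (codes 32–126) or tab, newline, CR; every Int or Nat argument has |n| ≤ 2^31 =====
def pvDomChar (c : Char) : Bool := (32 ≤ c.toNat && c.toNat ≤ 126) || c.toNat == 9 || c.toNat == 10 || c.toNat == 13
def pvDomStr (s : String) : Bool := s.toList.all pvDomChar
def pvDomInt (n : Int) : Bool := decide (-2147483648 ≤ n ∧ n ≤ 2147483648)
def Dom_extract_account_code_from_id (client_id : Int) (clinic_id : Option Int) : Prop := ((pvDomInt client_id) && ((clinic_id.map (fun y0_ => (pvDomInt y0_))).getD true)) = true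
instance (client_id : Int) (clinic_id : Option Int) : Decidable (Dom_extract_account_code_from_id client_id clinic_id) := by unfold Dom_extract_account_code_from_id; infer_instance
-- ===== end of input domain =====

-- B replaces A's 999-iteration numeric-prefix scan (clinic_id=None case) by a closed-form
-- one-character test; objective: simpler.

-- ===== PORT A =====
-- the 'for possible_clinic_id in range(1, 1000): … return …' loop; early return = stop recursing
def extract_account_code_aLoop (s : String) : List Int → String
  | [] => s
  | k :: rest =>
      let cs := PySem.Int.toStr k
      if PySem.Str.startswith s cs then PySem.Str.slice s (some (PySem.Str.len cs)) none
      else extract_account_code_aLoop s rest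

def extract_account_code_from_id (client_id : Int) (clinic_id : Option Int) : String :=
  let s := PySem.Int.toStr client_id
  match clinic_id with
  | none => extract_account_code_aLoop s (PySem.List.pyRange 1 1000)
  | some c =>
      let cs := PySem.Int.toStr c
      if PySem.Str.startswith s cs then PySem.Str.slice s (some (PySem.Str.len cs)) none else s

-- ===== PORT B =====
def extract_account_code_from_id_alt (client_id : Int) (clinic_id : Option Int) : String :=
  let s := PySem.Int.toStr client_id
  match clinic_id with
  | none =>
      if PySem.Str.isIn (PySem.Str.slice s none (some 1)) "123456789"
      then PySem.Str.slice s (some 1) none else s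
  | some c =>
      let p := PySem.Int.toStr c
      if PySem.Str.startswith s p then PySem.Str.slice s (some (PySem.Str.len p)) none else s

-- ===== PRECONDITION & SPEC =====
def Spec_extract_account_code_from_id (client_id : Int) (clinic_id : Option Int) (out : String) : Prop := out = extract_account_code_from_id_alt client_id clinic_id
instance (client_id : Int) (clinic_id : Option Int) (out : String) : Decidable (Spec_extract_account_code_from_id client_id clinic_id out) := by unfold Spec_extract_account_code_from_id; infer_instance

-- ===== CLAIM (what is proved, stated in full; the proofs are below) =====
def Claim_equal_extract_account_code_from_id : Prop := ∀ (client_id : Int) (clinic_id : Option Int), Dom_extract_account_code_from_id client_id clinic_id → Spec_extract_account_code_from_id client_id clinic_id (extract_account_code_from_id client_id clinic_id)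

-- ===== LEMMAS AND PROOFS =====

-- skipping a block of non-matching candidates
theorem aLoop_append_false (s : String) (l1 l2 : List Int)
    (h : ∀ k ∈ l1, PySem.Str.startswith s (PySem.Int.toStr k) = false) :
    extract_account_code_aLoop s (l1 ++ l2) = extract_account_code_aLoop s l2 := by
  induction l1 with
  | nil => rfl
  | cons a t ih =>
      have ha := h a (List.mem_cons_self ..)
      simp only [List.cons_append, extract_account_code_aLoop, ha, Bool.false_eq_true, if_false]
      exact ih (fun k hk => h k (List.mem_cons_of_mem _ hk))

theorem aLoop_all_false (s : String) (l : List Int)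
    (h : ∀ k ∈ l, PySem.Str.startswith s (PySem.Int.toStr k) = false) :
    extract_account_code_aLoop s l = s := by
  simpa using aLoop_append_false s l [] h

-- startswith against a one-character pattern is a head test
theorem startswith_single (s : String) (c d : Char) (rest : List Char) (h : s.toList = d :: rest) :
    PySem.Str.startswith s (String.ofList [c]) = decide (c = d) := by
  rw [PySem.Str.startswith_eq, h, String.toList_ofList]
  rcases eq_or_ne c d with rfl | hne
  · simpa using (PySem.Chars.startswith_iff (c :: rest) [c]).mpr ⟨rest, rfl⟩
  · simp only [hne, decide_false]
    apply Bool.eq_false_iff.mpr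
    intro hh
    have := (PySem.Chars.startswith_iff (d :: rest) [c]).mp hh
    rw [List.cons_prefix_cons] at this
    exact hne this.1

-- every candidate str(k) for k in range(1, 1000) begins with a nonzero digit
set_option maxRecDepth 100000 in
theorem toStr_head_digit : ∀ k ∈ PySem.List.pyRange 1 1000,
    ((PySem.Int.toStr k).toList.head?.any (fun c => c ∈ "123456789".toList)) = true := by
  decide

-- if the first character of s is not a nonzero digit, no candidate of A's loop matches
theorem no_match (s : String) (hd : ∀ c ∈ "123456789".toList, s.toList.head? ≠ some c) :
    ∀ k ∈ PySem.List.pyRange 1 1000, PySem.Str.startswith s (PySem.Int.toStr k) = false := by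
  intro k hk
  have h1 := toStr_head_digit k hk
  rcases htl : (PySem.Int.toStr k).toList with _ | ⟨c, t⟩
  · rw [htl] at h1; simp at h1
  · rw [htl] at h1
    simp only [List.head?_cons, Option.any_some, decide_eq_true_eq] at h1
    apply Bool.eq_false_iff.mpr
    intro hh
    rw [PySem.Str.startswith_eq] at hh
    have hpre := (PySem.Chars.startswith_iff s.toList (PySem.Int.toStr k).toList).mp hh
    rw [htl] at hpre
    obtain ⟨u, hu⟩ := hpre
    exact hd c h1 (by rw [← hu]; rfl)

-- one specific non-matching candidate: str(k) is a single digit char ≠ head of s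
theorem prev_false (s : String) (d : Char) (rest : List Char) (hs : s.toList = d :: rest)
    (k : Int) (h1 : 1 ≤ k) (h9 : k ≤ 9) (hne : Char.ofNat (48 + k.toNat) ≠ d) :
    PySem.Str.startswith s (PySem.Int.toStr k) = false := by
  have hk : PySem.Int.toStr k = String.ofList [Char.ofNat (48 + k.toNat)] := by
    interval_cases k <;> decide
  rw [hk, startswith_single s _ d rest hs]
  simp [hne]

-- the digit case: the loop finds str(m) first and strips exactly one character
theorem digit_branch (s : String) (d : Char) (rest : List Char) (hs : s.toList = d :: rest)
    (m : Int) (h1 : 1 ≤ m) (h9 : m ≤ 9) (hm : PySem.Int.toStr m = String.ofList [d])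
    (hprev : ∀ k ∈ PySem.List.pyRange 1 m, PySem.Str.startswith s (PySem.Int.toStr k) = false) :
    extract_account_code_aLoop s (PySem.List.pyRange 1 1000) = PySem.Str.slice s (some 1) none := by
  rw [PySem.List.pyRange_one_append 1 m 1000 h1 (by omega),
      aLoop_append_false s _ _ hprev, PySem.List.pyRange_one_cons (by omega : m < 1000)]
  have hsw : PySem.Str.startswith s (PySem.Int.toStr m) = true := by
    rw [hm, startswith_single s d d rest hs]; simp
  have hlen : PySem.Str.len (PySem.Int.toStr m) = 1 := by
    rw [hm, PySem.Str.len_eq, String.toList_ofList]; rfl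
  simp only [extract_account_code_aLoop, hsw, if_true, hlen]

-- the first character of s, when it is a digit d, makes B's condition true
theorem cond_of_head (s : String) (d : Char) (rest : List Char) (hs : s.toList = d :: rest) :
    PySem.Str.isIn (PySem.Str.slice s none (some 1)) "123456789"
      = PySem.Chars.isIn [d] "123456789".toList := by
  rw [PySem.Str.isIn_eq, PySem.Str.toList_slice, PySem.Chars.slice_eq_listSlice,
      PySem.List.slice_to s.toList (by norm_num : (0:Int) ≤ 1), hs]
  rfl

-- the clinic_id = None branch: A's scan equals B's closed-form test, for any str(client_id)
set_option maxHeartbeats 2000000 in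
theorem main_none (s : String) :
    extract_account_code_aLoop s (PySem.List.pyRange 1 1000)
      = if PySem.Str.isIn (PySem.Str.slice s none (some 1)) "123456789"
        then PySem.Str.slice s (some 1) none else s := by
  rcases hs : s.toList with _ | ⟨d, rest⟩
  · have hempty : s = "" := by rw [← String.ofList_toList (s := s), hs]
    subst hempty
    rw [aLoop_all_false _ _ (no_match _ (by intro c _ h; rw [hs] at h; exact (Option.some_ne_none c h.symm)))]
    decide
  · by_cases hdig : d ∈ "123456789".toList
    · have htrue : PySem.Chars.isIn [d] "123456789".toList = true := by
        rw [PySem.Chars.isIn_iff_infix]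
        obtain ⟨l1, l2, hmem⟩ := List.append_of_mem hdig
        exact ⟨l1, l2, by rw [hmem]; simp⟩
      rw [cond_of_head s d rest hs, htrue, if_pos rfl]
      have hprev : ∀ m : Int, 1 ≤ m → m ≤ 9 →
          (∀ j ∈ PySem.List.pyRange 1 m, Char.ofNat (48 + j.toNat) ≠ d) →
          PySem.Int.toStr m = String.ofList [d] →
          extract_account_code_aLoop s (PySem.List.pyRange 1 1000)
            = PySem.Str.slice s (some 1) none := by
        intro m h1 h9 hjs hm
        refine digit_branch s d rest hs m h1 h9 hm ?_
        intro k hk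
        have hb := PySem.List.mem_pyRange_one.mp hk
        exact prev_false s d rest hs k hb.1 (by omega) (hjs k hk)
      have hd9 : d = '1' ∨ d = '2' ∨ d = '3' ∨ d = '4' ∨ d = '5' ∨ d = '6' ∨ d = '7' ∨ d = '8' ∨ d = '9' := by
        have h : ("123456789".toList) = ['1','2','3','4','5','6','7','8','9'] := rfl
        rw [h] at hdig
        simpa [List.mem_cons] using hdig
      rcases hd9 with rfl | rfl | rfl | rfl | rfl | rfl | rfl | rfl | rfl
      · exact hprev 1 (by norm_num) (by norm_num)
          (by intro j hj; have := PySem.List.mem_pyRange_one.mp hj; omega) (by decide)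
      · exact hprev 2 (by norm_num) (by norm_num)
          (by intro j hj; obtain ⟨hj1, hj2⟩ := PySem.List.mem_pyRange_one.mp hj; interval_cases j; decide) (by decide)
      · exact hprev 3 (by norm_num) (by norm_num)
          (by intro j hj; obtain ⟨hj1, hj2⟩ := PySem.List.mem_pyRange_one.mp hj; interval_cases j <;> decide) (by decide)
      · exact hprev 4 (by norm_num) (by norm_num)
          (by intro j hj; obtain ⟨hj1, hj2⟩ := PySem.List.mem_pyRange_one.mp hj; interval_cases j <;> decide) (by decide)
      · exact hprev 5 (by norm_num) (by norm_num)
          (by intro j hj; obtain ⟨hj1, hj2⟩ := PySem.List.mem_pyRange_one.mp hj; interval_cases j <;> decide) (by decide)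
      · exact hprev 6 (by norm_num) (by norm_num)
          (by intro j hj; obtain ⟨hj1, hj2⟩ := PySem.List.mem_pyRange_one.mp hj; interval_cases j <;> decide) (by decide)
      · exact hprev 7 (by norm_num) (by norm_num)
          (by intro j hj; obtain ⟨hj1, hj2⟩ := PySem.List.mem_pyRange_one.mp hj; interval_cases j <;> decide) (by decide)
      · exact hprev 8 (by norm_num) (by norm_num)
          (by intro j hj; obtain ⟨hj1, hj2⟩ := PySem.List.mem_pyRange_one.mp hj; interval_cases j <;> decide) (by decide)
      · exact hprev 9 (by norm_num) (by norm_num)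
          (by intro j hj; obtain ⟨hj1, hj2⟩ := PySem.List.mem_pyRange_one.mp hj; interval_cases j <;> decide) (by decide)
    · rw [cond_of_head s d rest hs]
      have hfalse : PySem.Chars.isIn [d] "123456789".toList = false := by
        apply Bool.eq_false_iff.mpr
        intro hh
        obtain ⟨u, v, huv⟩ := (PySem.Chars.isIn_iff_infix [d] _).mp hh
        exact hdig (by rw [← huv]; simp)
      rw [hfalse, if_neg (by simp)]
      apply aLoop_all_false
      apply no_match
      intro c hc hhead
      rw [hs] at hhead
      simp only [List.head?_cons, Option.some.injEq] at hhead
      exact hdig (hhead ▸ hc)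

-- ===== VERDICT (by name: the statement is the Claim_ definition above) =====
theorem extract_account_code_from_id_spec : Claim_equal_extract_account_code_from_id := by
  intro client_id clinic_id _
  unfold Spec_extract_account_code_from_id extract_account_code_from_id extract_account_code_from_id_alt
  cases clinic_id with
  | none => exact main_none _
  | some c => rfl
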